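-- pv_equiv track=rewrite | github.com/structuralbioinformatics/ModCRE | scripts/benchmark/benchmark.py | split_list_into_n_sublists
-- ===== SOURCE A (Python) =====
-- def split_list_into_n_sublists(list_of_items, n=5):
--     """
--     This function splits a {list} of items into a {list} containing n {list}s.
--
--     @input:
--     list_of_items {list}
--     n {int} by default is 5
--
--     @return:
--     list_of_lists {list} of {list}s
--
--     """
--
--     # Initialize #
--     list_of_lists = []
--     # For each sublist... #
--     for i in range(n):
--         list_of_lists.append([])
--     # For each item... #
--     for item in list_of_items:
--         # For each sublist... #
--         for i in range(n):
--             # Initialize #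
--             add = True
--             # For each remaining sublist... #
--             for j in range(i, n):
--                 if len(list_of_lists[i]) != len(list_of_lists[j]):
--                     add = False
--                     break
--             # If add... #
--             if add:
--                 list_of_lists[i].append(item)
--                 break
--
--     return list_of_lists
-- ===== SOURCE B (Python) =====
-- def split_list_into_n_sublists(list_of_items, n=5):
--     # Direct round-robin by index striding: sublist i holds items i, i+n, i+2n, ...
--     return [[list_of_items[k] for k in range(i, len(list_of_items), n)]
--             for i in range(n)]
-- ===== Notes on version B (the rewrite author's own statement) =====
-- stated objective: faster
-- what changed: Replaces A's per-item linear scan with quadratic balance checks over all sublists by a direct stride construction: sublist i is exactly the items at indices i, i+n, i+2n, ..., built in one pass per sublist.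
import Mathlib
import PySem

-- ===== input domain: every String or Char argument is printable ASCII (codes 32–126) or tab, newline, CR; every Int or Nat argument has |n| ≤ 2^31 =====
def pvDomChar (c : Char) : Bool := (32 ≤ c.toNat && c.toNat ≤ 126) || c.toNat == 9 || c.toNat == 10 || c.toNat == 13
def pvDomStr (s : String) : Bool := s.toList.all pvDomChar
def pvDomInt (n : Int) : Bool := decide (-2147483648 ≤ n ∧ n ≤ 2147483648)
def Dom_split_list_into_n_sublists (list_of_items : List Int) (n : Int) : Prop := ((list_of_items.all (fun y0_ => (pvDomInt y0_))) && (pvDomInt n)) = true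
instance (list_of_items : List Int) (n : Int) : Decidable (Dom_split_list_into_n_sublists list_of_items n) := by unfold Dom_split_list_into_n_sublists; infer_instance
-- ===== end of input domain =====

-- B builds each sublist directly by index striding (items i, i+n, i+2n, ...) instead of
-- A's per-item search for the first sublist whose remaining sublists all have equal length.

-- ===== PORT A =====
-- inner 'for i in range(n): ... break' of A, as recursion over the remaining range;
-- the j-loop with its break is the short-circuiting List.all over range(i, n)
def pvLoopI (st : List (List Int)) (item : Int) (n : Int) : List Int → List (List Int)
  | [] => st
  | i :: rest =>
    let add := (PySem.List.pyRange i n 1).all (fun j =>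
      (PySem.List.pyGetD st i []).length == (PySem.List.pyGetD st j []).length)
    if add then PySem.List.pySetD st i ((PySem.List.pyGetD st i []) ++ [item])
    else pvLoopI st item n rest

def split_list_into_n_sublists (list_of_items : List Int) (n : Int) : List (List Int) :=
  let list_of_lists := (PySem.List.pyRange 0 n 1).foldl (fun acc _ => acc ++ [([] : List Int)]) []
  list_of_items.foldl (fun st item => pvLoopI st item n (PySem.List.pyRange 0 n 1)) list_of_lists

-- ===== PORT B =====
def split_list_into_n_sublists_alt (list_of_items : List Int) (n : Int) : List (List Int) :=
  (PySem.List.pyRange 0 n 1).map (fun i =>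
    (PySem.List.pyRange i (PySem.List.len list_of_items) n).map
      (fun k => PySem.List.pyGetD list_of_items k 0))

-- ===== PRECONDITION & SPEC =====
def Spec_split_list_into_n_sublists (list_of_items : List Int) (n : Int) (out : List (List Int)) : Prop := out = split_list_into_n_sublists_alt list_of_items n
instance (list_of_items : List Int) (n : Int) (out : List (List Int)) : Decidable (Spec_split_list_into_n_sublists list_of_items n out) := by unfold Spec_split_list_into_n_sublists; infer_instance

-- ===== CLAIM (what is proved, stated in full; the proofs are below) =====
def Claim_equal_split_list_into_n_sublists : Prop := ∀ (list_of_items : List Int) (n : Int), Dom_split_list_into_n_sublists list_of_items n → Spec_split_list_into_n_sublists list_of_items n (split_list_into_n_sublists list_of_items n)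

-- ===== LEMMAS AND PROOFS =====

-- bucket i of B: the items of l at indices i, i+n, i+2n, ...
def pvBucket (l : List Int) (n i : Int) : List Int :=
  (PySem.List.pyRange i (PySem.List.len l) n).map (fun k => PySem.List.pyGetD l k 0)

theorem pvBucket_alt (l : List Int) (n : Int) :
    split_list_into_n_sublists_alt l n = (PySem.List.pyRange 0 n 1).map (pvBucket l n) := rfl

-- closed form of the stride count (Int arithmetic)
theorem pvCnt_eq (n i B : Int) (hn : 0 < n) (h0 : 0 ≤ i) (hi : i < n) (hB : 0 ≤ B) :
    (if i < B then (B - i + n - 1) / n else 0)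
      = B / n + (if i < B % n then 1 else 0) := by
  have hqr : n * (B / n) + B % n = B := Int.mul_ediv_add_emod B n
  have hr0 : 0 ≤ B % n := Int.emod_nonneg B (by omega)
  have hrn : B % n < n := Int.emod_lt_of_pos B hn
  by_cases hiB : i < B
  · rw [if_pos hiB]
    by_cases hir : i < B % n
    · have h : (B - i + n - 1) / n = B / n + 1 :=
        ((Int.ediv_emod_unique (r := B % n - i - 1) hn).mpr
          ⟨by linear_combination hqr, by omega, by omega⟩).1
      rw [h, if_pos hir]
    · have h : (B - i + n - 1) / n = B / n :=
        ((Int.ediv_emod_unique (r := B % n - i + n - 1) hn).mpr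
          ⟨by linear_combination hqr, by omega, by omega⟩).1
      rw [h, if_neg hir]; omega
  · rw [if_neg hiB]
    have h1 : B / n = 0 := Int.ediv_eq_zero_of_lt hB (by omega)
    have h2 : B % n = B := Int.emod_eq_of_lt hB (by omega)
    rw [h1, h2, if_neg (by omega)]
    omega

theorem pvBucket_length (l : List Int) (n i : Int) (hn : 0 < n) (h0 : 0 ≤ i) (hi : i < n) :
    ((pvBucket l n i).length : Int)
      = (l.length : Int) / n + (if i < (l.length : Int) % n then 1 else 0) := by
  have hB : (0:Int) ≤ (l.length : Int) := by positivity
  rw [pvBucket, PySem.List.pyRange_of_pos _ _ hn, List.length_map, List.length_map,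
    List.length_range]
  rw [← pvCnt_eq n i (l.length : Int) hn h0 hi hB]
  simp only [PySem.List.len_eq]
  split_ifs with h
  · rw [Int.toNat_of_nonneg (Int.ediv_nonneg (by omega) (by omega))]
  · simp

theorem pvBucket_append (l : List Int) (a : Int) (n i : Int)
    (hn : 0 < n) (h0 : 0 ≤ i) (hi : i < n) :
    pvBucket (l ++ [a]) n i
      = pvBucket l n i ++ (if (l.length : Int) % n = i then [a] else []) := by
  have hB : (0:Int) ≤ (l.length : Int) := by positivity
  set B : Int := (l.length : Int) with hBdef
  have hqr : n * (B / n) + B % n = B := Int.mul_ediv_add_emod B n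
  have hr0 : 0 ≤ B % n := Int.emod_nonneg B (by omega)
  have hrn : B % n < n := Int.emod_lt_of_pos B hn
  -- the two stride counts
  set c : Nat := (if i < B then ((B - i + n - 1) / n).toNat else 0) with hcdef
  set c' : Nat := (if i < B + 1 then ((B + 1 - i + n - 1) / n).toNat else 0) with hc'def
  have hrw : pvBucket l n i
      = List.map (fun k : Nat => PySem.List.pyGetD l (i + n * (k:Int)) 0) (List.range c) := by
    rw [pvBucket, PySem.List.pyRange_of_pos _ _ hn, List.map_map]
    simp only [PySem.List.len_eq, ← hBdef, ← hcdef]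
    rfl
  have hrw' : pvBucket (l ++ [a]) n i
      = List.map (fun k : Nat => PySem.List.pyGetD (l ++ [a]) (i + n * (k:Int)) 0) (List.range c') := by
    rw [pvBucket, PySem.List.pyRange_of_pos _ _ hn, List.map_map]
    have hlen : (PySem.List.len (l ++ [a])) = B + 1 := by
      simp [PySem.List.len_eq, hBdef]
    rw [hlen]
    simp only [← hc'def]
    rfl
  have hcI : (c : Int) = B / n + (if i < B % n then 1 else 0) := by
    rw [hcdef, ← pvCnt_eq n i B hn h0 hi hB]
    split_ifs with h
    · exact Int.toNat_of_nonneg (Int.ediv_nonneg (by omega) (by omega))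
    · simp
  -- quotient/remainder of B+1
  have hkey : ∀ r' q' : Int, r' + n * q' = B + 1 → 0 ≤ r' → r' < n →
      (B + 1) / n = q' ∧ (B + 1) % n = r' := fun r' q' h1 h2 h3 =>
    ⟨((Int.ediv_emod_unique hn).mpr ⟨h1, h2, h3⟩).1,
     ((Int.ediv_emod_unique hn).mpr ⟨h1, h2, h3⟩).2⟩
  have hc'I : (c' : Int) = (c : Int) + (if B % n = i then 1 else 0) := by
    have h1 : (c' : Int) = (B + 1) / n + (if i < (B + 1) % n then 1 else 0) := by
      have harith : (B + 1 - i + n - 1) = (B + 1) - i + n - 1 := by ring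
      rw [hc'def, harith, ← pvCnt_eq n i (B + 1) hn h0 hi (by omega)]
      split_ifs with h
      · exact Int.toNat_of_nonneg (Int.ediv_nonneg (by omega) (by omega))
      · simp
    by_cases hr : B % n = n - 1
    · obtain ⟨hq1, hr1⟩ := hkey 0 (B / n + 1) (by linear_combination hqr - hr) (by omega) (by omega)
      rw [h1, hcI, hq1, hr1]
      split_ifs <;> omega
    · obtain ⟨hq1, hr1⟩ := hkey (B % n + 1) (B / n) (by linear_combination hqr) (by omega) (by omega)
      rw [h1, hcI, hq1, hr1]
      split_ifs <;> omega
  have hncI : n * (c : Int) = n * (B / n) + (if i < B % n then n else 0) := by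
    rw [hcI]; split_ifs <;> ring
  have hidx : ∀ k : Nat, k < c → i + n * (k:Int) < B := by
    intro k hk
    have h1 : ((k:Int) + 1) ≤ (c : Int) := by exact_mod_cast hk
    have h2 : n * ((k:Int) + 1) ≤ n * (c:Int) :=
      mul_le_mul_of_nonneg_left h1 (by omega)
    split_ifs at hncI with h <;> nlinarith [hncI, hqr]
  have hcong : List.map (fun k : Nat => PySem.List.pyGetD (l ++ [a]) (i + n * (k:Int)) 0) (List.range c)
      = List.map (fun k : Nat => PySem.List.pyGetD l (i + n * (k:Int)) 0) (List.range c) := by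
    apply List.map_congr_left
    intro k hk
    have hk' := hidx k (List.mem_range.mp hk)
    have hnn : (0:Int) ≤ i + n * (k:Int) := by positivity
    have hlt : i + n * (k:Int) < ((l ++ [a]).length : Int) := by
      simp only [List.length_append, List.length_singleton]
      push_cast; omega
    rw [PySem.List.pyGetD_eq_getElem _ _ hnn hlt,
        PySem.List.pyGetD_eq_getElem _ _ hnn (by omega)]
    exact List.getElem_append_left (by omega)
  rw [hrw, hrw']
  by_cases hri : B % n = i
  · have hc1 : c' = c + 1 := by
      have := hc'I
      rw [if_pos hri] at this
      omega
    have hfc : i + n * (c : Int) = B := by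
      have hc2 : (c : Int) = B / n := by rw [hcI, if_neg (by omega)]; omega
      rw [hc2]; linear_combination hqr - hri
    rw [if_pos hri, hc1, List.range_succ, List.map_append, hcong]
    congr 1
    simp only [List.map_cons, List.map_nil]
    congr 1
    rw [hfc]
    have hBlt : B < ((l ++ [a]).length : Int) := by
      simp only [List.length_append, List.length_singleton]; push_cast; omega
    rw [PySem.List.pyGetD_eq_getElem _ _ hB hBlt]
    have hBt : B.toNat = l.length := by omega
    exact List.getElem_concat_length (by omega) _
  · have hc1 : c' = c := by
      have := hc'I
      rw [if_neg hri] at this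
      omega
    rw [if_neg hri, hc1, hcong, List.append_nil]

theorem pvBucket_nil (n i : Int) (hn : 0 < n) (h0 : 0 ≤ i) : pvBucket [] n i = [] := by
  rw [pvBucket, PySem.List.pyRange_of_pos _ _ hn]
  simp only [PySem.List.len_eq, List.length_nil, Nat.cast_zero]
  rw [if_neg (by omega)]
  simp

theorem pvState_get (f : Int → List Int) (n j : Int) (h0 : 0 ≤ j) (hj : j < n) :
    PySem.List.pyGetD ((PySem.List.pyRange 0 n 1).map f) j [] = f j := by
  have hlen : (((PySem.List.pyRange 0 n 1).map f).length : Int) = n := by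
    rw [List.length_map, PySem.List.length_pyRange_one]; omega
  rw [PySem.List.pyGetD_eq_getElem _ _ h0 (by omega)]
  rw [List.getElem_map, PySem.List.getElem_pyRange_one]
  congr 1
  omega

theorem pvLoopI_cons_true (st : List (List Int)) (a n i : Int) (rest : List Int)
    (h : ((PySem.List.pyRange i n 1).all (fun j =>
      (PySem.List.pyGetD st i []).length == (PySem.List.pyGetD st j []).length)) = true) :
    pvLoopI st a n (i :: rest)
      = PySem.List.pySetD st i ((PySem.List.pyGetD st i []) ++ [a]) := by
  simp [pvLoopI, h]

theorem pvLoopI_cons_false (st : List (List Int)) (a n i : Int) (rest : List Int)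
    (h : ((PySem.List.pyRange i n 1).all (fun j =>
      (PySem.List.pyGetD st i []).length == (PySem.List.pyGetD st j []).length)) = false) :
    pvLoopI st a n (i :: rest) = pvLoopI st a n rest := by
  simp [pvLoopI, h]

theorem pvSlot (l : List Int) (a : Int) (n : Int) (hn : 0 < n) :
    pvLoopI ((PySem.List.pyRange 0 n 1).map (pvBucket l n)) a n (PySem.List.pyRange 0 n 1)
      = (PySem.List.pyRange 0 n 1).map (pvBucket (l ++ [a]) n) := by
  set st := (PySem.List.pyRange 0 n 1).map (pvBucket l n) with hst
  have hB : (0:Int) ≤ (l.length : Int) := by positivity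
  have hr0 : 0 ≤ (l.length : Int) % n := Int.emod_nonneg _ (by omega)
  have hrn : (l.length : Int) % n < n := Int.emod_lt_of_pos _ hn
  have aux : ∀ (d : Nat) (i : Int), 0 ≤ i → i + d = (l.length : Int) % n →
      pvLoopI st a n (PySem.List.pyRange i n 1)
        = (PySem.List.pyRange 0 n 1).map (pvBucket (l ++ [a]) n) := by
    intro d
    induction d with
    | zero =>
      intro i h0 hir
      have hieq : i = (l.length : Int) % n := by omega
      rw [PySem.List.pyRange_one_cons (show i < n by omega)]
      rw [pvLoopI_cons_true]
      · -- the appended state is the buckets of l ++ [a]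
        rw [pvState_get _ _ _ h0 (by omega), PySem.List.pySetD_of_nonneg _ _ h0]
        apply List.ext_getElem
        · simp [hst, PySem.List.length_pyRange_one]
        · intro p h1 h2
          have hp : (p : Int) < n := by
            have := h2
            simp only [List.length_map, PySem.List.length_pyRange_one] at this
            omega
          have hz : (0 : Int) + (p : Nat) = (p : Int) := by omega
          rw [List.getElem_set, List.getElem_map, PySem.List.getElem_pyRange_one, hz,
            List.getElem_map, PySem.List.getElem_pyRange_one, hz,
            pvBucket_append l a n (p : Int) hn (by positivity) hp]
          by_cases hpe : i.toNat = p
          · rw [if_pos hpe, if_pos (by omega)]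
            congr 2
            omega
          · rw [if_neg hpe, if_neg (by omega), List.append_nil]
      · rw [List.all_eq_true]
        intro j hj
        have hj' := (PySem.List.mem_pyRange_one).mp hj
        rw [pvState_get _ _ _ h0 (by omega), pvState_get _ _ _ (by omega) (by omega)]
        have hbi := pvBucket_length l n i hn h0 (by omega)
        have hbj := pvBucket_length l n j hn (by omega) (by omega)
        rw [if_neg (by omega)] at hbi
        rw [if_neg (by omega)] at hbj
        simp only [beq_iff_eq]
        omega
    | succ d ih =>
      intro i h0 hir
      rw [PySem.List.pyRange_one_cons (show i < n by omega)]
      rw [pvLoopI_cons_false]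
      · exact ih (i + 1) (by omega) (by omega)
      · rw [List.all_eq_false]
        refine ⟨n - 1, (PySem.List.mem_pyRange_one).mpr ⟨by omega, by omega⟩, ?_⟩
        rw [pvState_get _ _ _ h0 (by omega), pvState_get _ _ _ (by omega) (by omega)]
        have hbi := pvBucket_length l n i hn h0 (by omega)
        have hbj := pvBucket_length l n (n - 1) hn (by omega) (by omega)
        rw [if_pos (by omega)] at hbi
        rw [if_neg (by omega)] at hbj
        simp only [beq_iff_eq]
        omega
  exact aux ((l.length : Int) % n).toNat 0 le_rfl (by omega)

theorem pvMain (l : List Int) (n : Int) (hn : 0 < n) :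
    split_list_into_n_sublists l n = (PySem.List.pyRange 0 n 1).map (pvBucket l n) := by
  induction l using List.reverseRecOn with
  | nil =>
    show List.foldl (fun st item => pvLoopI st item n (PySem.List.pyRange 0 n 1))
        ((PySem.List.pyRange 0 n 1).foldl
        (fun acc _ => acc ++ [([] : List Int)]) []) ([] : List Int) = _
    rw [List.foldl_nil]
    refine Eq.trans (PySem.List.foldl_append_singleton_eq_map
      (fun _ : Int => ([] : List Int)) (PySem.List.pyRange 0 n 1) []) ?_
    rw [List.nil_append]
    exact List.map_congr_left (fun i hi =>
      (pvBucket_nil n i hn ((PySem.List.mem_pyRange_one).mp hi).1).symm)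
  | append_singleton l x ih =>
    show List.foldl (fun st item => pvLoopI st item n (PySem.List.pyRange 0 n 1))
        ((PySem.List.pyRange 0 n 1).foldl
        (fun acc _ => acc ++ [([] : List Int)]) []) (l ++ [x]) = _
    rw [List.foldl_append, List.foldl_cons, List.foldl_nil]
    have ih' : List.foldl (fun st item => pvLoopI st item n (PySem.List.pyRange 0 n 1))
        ((PySem.List.pyRange 0 n 1).foldl (fun acc _ => acc ++ [([] : List Int)]) []) l
        = (PySem.List.pyRange 0 n 1).map (pvBucket l n) := ih
    rw [ih']
    exact pvSlot l x n hn

-- ===== VERDICT (by name: the statement is the Claim_ definition above) =====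
theorem split_list_into_n_sublists_spec : Claim_equal_split_list_into_n_sublists := by
  intro l n hdom
  clear hdom
  show split_list_into_n_sublists l n = split_list_into_n_sublists_alt l n
  by_cases hn : 0 < n
  · rw [pvMain l n hn, pvBucket_alt]
  · have hr : PySem.List.pyRange 0 n 1 = [] := PySem.List.pyRange_one_eq_nil (by omega)
    show List.foldl _ ((PySem.List.pyRange 0 n 1).foldl _ []) l = _
    rw [pvBucket_alt, hr]
    simp only [List.foldl_nil, List.map_nil]
    induction l with
    | nil => rfl
    | cons x xs ih => rw [List.foldl_cons, show pvLoopI [] x n [] = [] from rfl]; exact ih
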